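-- pv_equiv track=rewrite | github.com/codewitgabi/Coding_Interview_Questions | problem15.py | longest_palindromic_string
-- ===== SOURCE A (Python) =====
-- def longest_palindromic_string(char: str) -> str:
-- 	substrings = []
-- 	str_length = len(char)
-- 	for i in range(str_length):
-- 		for j in range(i, str_length):
-- 			substring = char[j: str_length]
-- 			if substring == substring[::-1]:
-- 				substrings.append(substring)
-- 	substrings.sort()
-- 	return substrings[-1]
-- ===== SOURCE B (Python) =====
-- def longest_palindromic_string(char: str) -> str:
--     best = None
--     for j in range(len(char)):
--         s = char[j:]
--         if s == s[::-1] and (best is None or s > best):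
--             best = s
--     return best
-- ===== Notes on version B (the rewrite author's own statement) =====
-- stated objective: faster
-- what changed: A collects every suffix char[j:] once per (i,j) pair of a redundant double loop, sorts the whole candidate list and takes the last element; B makes a single pass over the suffixes, checks each for being a palindrome and keeps a running lexicographic maximum, so the outer loop and the sort disappear.
-- outside the precondition, e.g. on longest_palindromic_string(''): A raises IndexError, B returns None
import Mathlib
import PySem

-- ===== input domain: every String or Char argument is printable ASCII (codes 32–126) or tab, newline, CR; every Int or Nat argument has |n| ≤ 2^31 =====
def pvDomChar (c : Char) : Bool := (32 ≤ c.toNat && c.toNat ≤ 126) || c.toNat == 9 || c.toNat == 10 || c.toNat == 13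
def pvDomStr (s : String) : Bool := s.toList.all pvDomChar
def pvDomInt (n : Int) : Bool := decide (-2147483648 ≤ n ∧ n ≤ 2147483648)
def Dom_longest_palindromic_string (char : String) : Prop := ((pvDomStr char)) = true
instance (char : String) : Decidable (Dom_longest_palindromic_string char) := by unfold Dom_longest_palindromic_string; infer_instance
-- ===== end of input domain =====

-- B replaces A's candidate-collecting double loop + sort with a single pass over the suffixes keeping a running maximum; same return value on every nonempty string.

-- ===== PORT A =====
def longest_palindromic_string (char : String) : String :=
  let cs := char.toList
  let str_length : Int := cs.length
  let substrings : List (List Char) :=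
    (PySem.List.pyRange 0 str_length 1).foldl (fun acc i =>
      (PySem.List.pyRange i str_length 1).foldl (fun acc2 j =>
        let substring := PySem.List.slice cs (some j) (some str_length)
        if substring = (PySem.List.slice? substring none none (-1)).getD [] then
          acc2 ++ [substring]
        else acc2) acc) []
  let sorted := PySem.List.sorted substrings (fun x => x) false
  String.ofList (PySem.List.pyGetD sorted (-1) [])   -- substrings[-1]; Pre_ (char ≠ "") makes the list nonempty

-- ===== PORT B =====
def longest_palindromic_string_alt (char : String) : String :=
  let cs := char.toList
  let best : Option (List Char) :=
    (PySem.List.pyRange 0 (cs.length : Int) 1).foldl (fun best j =>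
      let s := PySem.List.slice cs (some j) none
      if s = (PySem.List.slice? s none none (-1)).getD [] then
        match best with
        | none => some s
        | some b => if b < s then some s else best
      else best) none
  String.ofList (best.getD [])   -- Python B returns best; under Pre_ (char ≠ "") best is a string, never None

-- ===== PRECONDITION & SPEC =====
-- Pre_ excludes exactly the empty string, on which Python A raises IndexError (substrings stays empty; Python B returns None there, not a str).
def Pre_longest_palindromic_string (char : String) : Prop := char ≠ ""
instance (char : String) : Decidable (Pre_longest_palindromic_string char) := by unfold Pre_longest_palindromic_string; infer_instance
def pvWitness_longest_palindromic_string : String := "ab"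
def Spec_longest_palindromic_string (char : String) (out : String) : Prop := out = longest_palindromic_string_alt char
instance (char : String) (out : String) : Decidable (Spec_longest_palindromic_string char out) := by unfold Spec_longest_palindromic_string; infer_instance

-- ===== CLAIM (what is proved, stated in full; the proofs are below) =====
def Claim_equal_longest_palindromic_string : Prop := ∀ (char : String), Dom_longest_palindromic_string char → Pre_longest_palindromic_string char → Spec_longest_palindromic_string char (longest_palindromic_string char)

-- ===== LEMMAS AND PROOFS =====

-- the suffix char[j:] as a list, for 0 ≤ j
def pvSuff (cs : List Char) (j : Int) : List Char := List.drop j.toNat cs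

-- the shape of A's candidate list: all palindromic suffixes (with repetitions)
def pvCands (cs : List Char) : List (List Char) :=
  (PySem.List.pyRange 0 (cs.length : Int) 1).flatMap (fun i =>
    ((PySem.List.pyRange i (cs.length : Int) 1).filter
        (fun j => decide (pvSuff cs j = (pvSuff cs j).reverse))).map (pvSuff cs))

-- B's loop step, with the slice normalised to pvSuff
def pvStep (cs : List Char) (best : Option (List Char)) (j : Int) : Option (List Char) :=
  if pvSuff cs j = (pvSuff cs j).reverse then
    match best with
    | none => some (pvSuff cs j)
    | some b => if b < pvSuff cs j then some (pvSuff cs j) else best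
  else best

lemma pvSlice_eq (cs : List Char) {j : Int} (hj : 0 ≤ j) :
    PySem.List.slice cs (some j) (some (cs.length : Int)) = pvSuff cs j := by
  rw [PySem.List.slice_toNat cs hj (by positivity)]
  simp [pvSuff, List.take_of_length_le]

lemma A_substrings_eq (cs : List Char) :
    ((PySem.List.pyRange 0 (cs.length : Int) 1).foldl (fun acc i =>
      (PySem.List.pyRange i (cs.length : Int) 1).foldl (fun acc2 j =>
        if PySem.List.slice cs (some j) (some (cs.length : Int)) =
            (PySem.List.slice? (PySem.List.slice cs (some j) (some (cs.length : Int))) none none (-1)).getD [] then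
          acc2 ++ [PySem.List.slice cs (some j) (some (cs.length : Int))]
        else acc2) acc) ([] : List (List Char))) = pvCands cs := by
  rw [PySem.List.foldl_congr_mem _ _ (fun acc i =>
      acc ++ ((PySem.List.pyRange i (cs.length : Int) 1).filter
        (fun j => decide (pvSuff cs j = (pvSuff cs j).reverse))).map (pvSuff cs)) []
    (by
      intro acc i hi
      have hi0 : (0:Int) ≤ i := (PySem.List.mem_pyRange_one.1 hi).1
      rw [PySem.List.foldl_congr_mem _ _ (fun acc2 j =>
          if decide (pvSuff cs j = (pvSuff cs j).reverse) = true then acc2 ++ [pvSuff cs j] else acc2) acc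
        (by
          intro acc2 j hj
          have hj0 : (0:Int) ≤ j := le_trans hi0 (PySem.List.mem_pyRange_one.1 hj).1
          rw [pvSlice_eq cs hj0, PySem.List.slice?_none_none_neg_one]
          simp)]
      rw [PySem.List.foldl_append_if])]
  rw [PySem.List.foldl_append_eq_flatMap]
  simp [pvCands]

lemma mem_pvCands (cs : List Char) (x : List Char) :
    x ∈ pvCands cs ↔ ∃ j : Int, 0 ≤ j ∧ j < (cs.length : Int) ∧
      pvSuff cs j = (pvSuff cs j).reverse ∧ x = pvSuff cs j := by
  simp only [pvCands, List.mem_flatMap, List.mem_map, List.mem_filter,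
    PySem.List.mem_pyRange_one, decide_eq_true_eq]
  constructor
  · rintro ⟨i, ⟨hi0, hin⟩, j, ⟨⟨hij, hjn⟩, hp⟩, hx⟩
    exact ⟨j, le_trans hi0 hij, hjn, hp, hx.symm⟩
  · rintro ⟨j, hj0, hjn, hp, hx⟩
    exact ⟨0, ⟨le_refl 0, lt_of_le_of_lt hj0 hjn⟩, j, ⟨⟨hj0, hjn⟩, hp⟩, hx.symm⟩

lemma pvCands_ne_nil (cs : List Char) (h : cs ≠ []) : pvCands cs ≠ [] := by
  have hlen : 0 < cs.length := List.length_pos_iff.2 h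
  have hmem : pvSuff cs ((cs.length : Int) - 1) ∈ pvCands cs := by
    rw [mem_pvCands]
    refine ⟨(cs.length : Int) - 1, by omega, by omega, ?_, rfl⟩
    have h1 : (pvSuff cs ((cs.length : Int) - 1)).length = 1 := by
      simp [pvSuff]
      omega
    obtain ⟨a, ha⟩ := List.length_eq_one_iff.1 h1
    rw [ha]; rfl
  intro hnil; rw [hnil] at hmem; exact absurd hmem (List.not_mem_nil)

lemma getLast_ub {l : List (List Char)} (hp : l.Pairwise (fun a b => a ≤ b)) (h : l ≠ []) :
    ∀ y ∈ l, y ≤ l.getLast h := by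
  induction l with
  | nil => exact absurd rfl h
  | cons x xs ih =>
    rcases List.pairwise_cons.1 hp with ⟨hx, hxs⟩
    intro y hy
    rcases List.mem_cons.1 hy with rfl | hy'
    · cases xs with
      | nil => simp
      | cons z zs =>
        rw [List.getLast_cons (by simp)]
        exact le_trans (hx _ (List.getLast_mem _)) (le_refl _)
    · have hxs_ne : xs ≠ [] := List.ne_nil_of_mem hy'
      rw [List.getLast_cons hxs_ne]
      exact ih hxs hxs_ne y hy'

lemma sortedCL_pairwise (xs : List (List Char)) :
    (PySem.List.sorted xs (fun x => x) false).Pairwise (fun a b => a ≤ b) := by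
  have := PySem.List.sorted_pairwise (κ := List Char) xs (fun x => x)
  convert this using 2

lemma B_fold_eq (cs : List Char) :
    ((PySem.List.pyRange 0 (cs.length : Int) 1).foldl (fun best j =>
      let s := PySem.List.slice cs (some j) none
      if s = (PySem.List.slice? s none none (-1)).getD [] then
        match best with
        | none => some s
        | some b => if b < s then some s else best
      else best) none) = (PySem.List.pyRange 0 (cs.length : Int) 1).foldl (pvStep cs) none := by
  apply PySem.List.foldl_congr_mem
  intro acc j hj
  have hj0 : (0:Int) ≤ j := (PySem.List.mem_pyRange_one.1 hj).1
  have hs : PySem.List.slice cs (some j) none = pvSuff cs j := PySem.List.slice_from cs hj0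
  simp only [hs, PySem.List.slice?_none_none_neg_one, Option.getD_some, pvStep]

lemma pvStep_fold_inv (cs : List Char) (js : List Int) (acc : Option (List Char)) :
    (js.foldl (pvStep cs) acc = acc ∨
      ∃ j ∈ js, pvSuff cs j = (pvSuff cs j).reverse ∧ js.foldl (pvStep cs) acc = some (pvSuff cs j)) ∧
    (∀ b, acc = some b → ∃ m, js.foldl (pvStep cs) acc = some m ∧ b ≤ m) ∧
    (∀ j ∈ js, pvSuff cs j = (pvSuff cs j).reverse →
      ∃ m, js.foldl (pvStep cs) acc = some m ∧ pvSuff cs j ≤ m) := by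
  induction js generalizing acc with
  | nil => exact ⟨Or.inl rfl, fun b hb => ⟨b, hb, le_refl b⟩, fun j hj => absurd hj (List.not_mem_nil)⟩
  | cons j js ih =>
    obtain ⟨ih1, ih2, ih3⟩ := ih (pvStep cs acc j)
    have hstep : pvStep cs acc j = acc ∨
        (pvSuff cs j = (pvSuff cs j).reverse ∧ pvStep cs acc j = some (pvSuff cs j)) := by
      unfold pvStep
      by_cases hpal : pvSuff cs j = (pvSuff cs j).reverse
      · rw [if_pos hpal]
        cases acc with
        | none => exact Or.inr ⟨hpal, rfl⟩
        | some b =>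
          dsimp only
          by_cases hb : b < pvSuff cs j
          · rw [if_pos hb]; exact Or.inr ⟨hpal, rfl⟩
          · rw [if_neg hb]; exact Or.inl rfl
      · rw [if_neg hpal]; exact Or.inl rfl
    have hmono : ∀ b, acc = some b → ∃ b', pvStep cs acc j = some b' ∧ b ≤ b' := by
      intro b hb
      subst hb
      unfold pvStep
      by_cases hpal : pvSuff cs j = (pvSuff cs j).reverse
      · rw [if_pos hpal]
        dsimp only
        by_cases hblt : b < pvSuff cs j
        · rw [if_pos hblt]; exact ⟨pvSuff cs j, rfl, le_of_lt hblt⟩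
        · rw [if_neg hblt]; exact ⟨b, rfl, le_refl b⟩
      · rw [if_neg hpal]; exact ⟨b, rfl, le_refl b⟩
    have hself : pvSuff cs j = (pvSuff cs j).reverse →
        ∃ b', pvStep cs acc j = some b' ∧ pvSuff cs j ≤ b' := by
      intro hpal
      unfold pvStep
      rw [if_pos hpal]
      cases acc with
      | none => exact ⟨pvSuff cs j, rfl, le_refl _⟩
      | some b =>
        dsimp only
        by_cases hblt : b < pvSuff cs j
        · rw [if_pos hblt]; exact ⟨pvSuff cs j, rfl, le_refl _⟩
        · rw [if_neg hblt]; exact ⟨b, rfl, le_of_not_gt hblt⟩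
    simp only [List.foldl_cons]
    refine ⟨?_, ?_, ?_⟩
    · rcases ih1 with h | ⟨j', hj', hp', hr⟩
      · rcases hstep with h2 | ⟨hp2, h2⟩
        · exact Or.inl (h.trans h2)
        · exact Or.inr ⟨j, List.mem_cons_self, hp2, h.trans h2⟩
      · exact Or.inr ⟨j', List.mem_cons_of_mem _ hj', hp', hr⟩
    · intro b hb
      obtain ⟨b', hb', hle⟩ := hmono b hb
      obtain ⟨m, hm, hle'⟩ := ih2 b' hb'
      exact ⟨m, hm, le_trans hle hle'⟩
    · intro j' hj' hp'
      rcases List.mem_cons.1 hj' with rfl | hj''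
      · obtain ⟨b', hb', hle⟩ := hself hp'
        obtain ⟨m, hm, hle'⟩ := ih2 b' hb'
        exact ⟨m, hm, le_trans hle hle'⟩
      · exact ih3 j' hj'' hp'

-- ===== VERDICT (by name: the statement is the Claim_ definition above) =====
theorem longest_palindromic_string_spec : Claim_equal_longest_palindromic_string := by
  intro char _ hpre
  unfold Spec_longest_palindromic_string
  have hcs : char.toList ≠ [] := by
    intro hl; apply hpre
    have := congrArg String.ofList hl
    simpa using this
  simp only [longest_palindromic_string, longest_palindromic_string_alt]
  rw [A_substrings_eq char.toList, B_fold_eq char.toList]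
  set cs := char.toList with hcs_def
  have hne : pvCands cs ≠ [] := pvCands_ne_nil cs hcs
  have hsne : PySem.List.sorted (pvCands cs) (fun x => x) false ≠ [] := by
    rw [Ne, PySem.List.sorted_eq_nil_iff]; exact hne
  rw [PySem.List.pyGetD_neg_one _ _ hsne]
  set M := (PySem.List.sorted (pvCands cs) (fun x => x) false).getLast hsne with hM
  have hMmem : M ∈ pvCands cs :=
    (PySem.List.mem_sorted _ _ _ _).1 (List.getLast_mem hsne)
  have hMub : ∀ y ∈ pvCands cs, y ≤ M := by
    intro y hy
    exact getLast_ub (sortedCL_pairwise (pvCands cs)) hsne y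
      ((PySem.List.mem_sorted _ _ _ _).2 hy)
  obtain ⟨h1, _, h3⟩ := pvStep_fold_inv cs (PySem.List.pyRange 0 (cs.length : Int) 1) none
  obtain ⟨j0, hj00, hj0n, hj0p, hj0x⟩ := (mem_pvCands cs M).1 hMmem
  obtain ⟨m, hm, hle⟩ := h3 j0 (PySem.List.mem_pyRange_one.2 ⟨hj00, hj0n⟩) hj0p
  rcases h1 with hnone | ⟨j1, hj1, hp1, hr1⟩
  · rw [hnone] at hm; exact absurd hm (by simp)
  · have hm1 : m = pvSuff cs j1 := by
      rw [hr1] at hm; exact (Option.some_inj.1 hm).symm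
    have hmemc : pvSuff cs j1 ∈ pvCands cs := by
      rw [mem_pvCands]
      rcases PySem.List.mem_pyRange_one.1 hj1 with ⟨hl, hr⟩
      exact ⟨j1, hl, hr, hp1, rfl⟩
    have hMeq : M = m := by
      apply le_antisymm
      · rw [← hj0x] at hle; exact hle
      · rw [hm1]; exact hMub _ hmemc
    rw [hr1, hm1.symm, ← hMeq]
    rfl
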